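-- pv_equiv track=rewrite | github.com/haveyouwantto/Minecraft-MIDI-Player | player.py | drawKeyboard
-- ===== SOURCE A (Python) =====
-- def drawKeyboard(e,s=0):
--     out=""
--     i=s
--     while i < e:
--         if (i % 12 == 1 or i % 12 == 3 or i % 12 == 6 or i % 12 == 8 or i % 12 == 10):
--             out += "\u00a70\u258F"
--         else:
--             out += "\u00a7f\u258F"
--         i+=1
--     return out
-- ===== SOURCE B (Python) =====
-- # Period-12 keyboard block, rotated to the start offset, tiled and sliced.
-- _BLOCK = ["\u00a7f\u258F", "\u00a70\u258F", "\u00a7f\u258F", "\u00a70\u258F",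
--           "\u00a7f\u258F", "\u00a7f\u258F", "\u00a70\u258F", "\u00a7f\u258F",
--           "\u00a70\u258F", "\u00a7f\u258F", "\u00a70\u258F", "\u00a7f\u258F"]
--
-- def drawKeyboard(e, s=0):
--     n = e - s
--     if n <= 0:
--         return ""
--     r = s % 12
--     rot = _BLOCK[r:] + _BLOCK[:r]
--     tiled = rot * (n // 12 + 1)
--     return "".join(tiled[:n])
-- ===== Notes on version B (the rewrite author's own statement) =====
-- stated objective: alternative
-- what changed: Replaces the per-index modulo-test loop with a precomputed 12-key period that is rotated to the start offset, tiled by repetition and sliced to the requested length, then joined once.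
import Mathlib
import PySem

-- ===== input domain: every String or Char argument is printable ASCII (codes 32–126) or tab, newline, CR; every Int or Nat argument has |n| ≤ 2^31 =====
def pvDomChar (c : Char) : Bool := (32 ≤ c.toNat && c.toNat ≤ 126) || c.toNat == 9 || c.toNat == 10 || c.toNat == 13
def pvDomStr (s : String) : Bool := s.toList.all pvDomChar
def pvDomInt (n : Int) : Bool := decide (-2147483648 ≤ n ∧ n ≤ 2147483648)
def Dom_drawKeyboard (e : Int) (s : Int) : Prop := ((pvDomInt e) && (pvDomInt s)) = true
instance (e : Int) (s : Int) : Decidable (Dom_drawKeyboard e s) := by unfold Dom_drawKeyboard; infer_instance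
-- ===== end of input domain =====

-- B replaces A's per-index modulo-test loop by a precomputed 12-key period, rotated to the
-- start offset, tiled by list repetition, sliced to the requested length and joined once (alternative decomposition).


-- ===== PORT A =====
-- the while loop 'i = s; while i < e: …; i += 1' is the fold over range(s, e)
def drawKeyboard (e : Int) (s : Int) : String :=
  (PySem.List.pyRange s e 1).foldl
    (fun out i =>
      if PySem.Int.mod i 12 = 1 ∨ PySem.Int.mod i 12 = 3 ∨ PySem.Int.mod i 12 = 6 ∨
         PySem.Int.mod i 12 = 8 ∨ PySem.Int.mod i 12 = 10 then
        out ++ "\u00a70\u258F"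
      else
        out ++ "\u00a7f\u258F") ""

-- ===== PORT B =====
def pvBlock : List String :=
  ["\u00a7f\u258F", "\u00a70\u258F", "\u00a7f\u258F", "\u00a70\u258F",
   "\u00a7f\u258F", "\u00a7f\u258F", "\u00a70\u258F", "\u00a7f\u258F",
   "\u00a70\u258F", "\u00a7f\u258F", "\u00a70\u258F", "\u00a7f\u258F"]

def drawKeyboard_alt (e : Int) (s : Int) : String :=
  let n := e - s
  if n ≤ 0 then ""
  else
    let r := PySem.Int.mod s 12
    let rot := PySem.List.slice pvBlock (some r) none ++ PySem.List.slice pvBlock none (some r)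
    let tiled := PySem.List.pyRepeat rot (PySem.Int.floordiv n 12 + 1)
    PySem.Str.join "" (PySem.List.slice tiled none (some n))

-- ===== PRECONDITION & SPEC =====
def Spec_drawKeyboard (e : Int) (s : Int) (out : String) : Prop := out = drawKeyboard_alt e s
instance (e : Int) (s : Int) (out : String) : Decidable (Spec_drawKeyboard e s out) := by unfold Spec_drawKeyboard; infer_instance

-- ===== CLAIM (what is proved, stated in full; the proofs are below) =====
def Claim_equal_drawKeyboard : Prop := ∀ (e : Int) (s : Int), Dom_drawKeyboard e s → Spec_drawKeyboard e s (drawKeyboard e s)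

-- ===== LEMMAS AND PROOFS =====

-- joining with the empty separator is flatten
theorem pv_join_nil_eq_flatten (parts : List (List Char)) :
    PySem.Chars.join [] parts = parts.flatten := by
  induction parts with
  | nil => simp [PySem.Chars.join_nil]
  | cons p rest ih =>
    cases rest with
    | nil => simp [PySem.Chars.join_singleton]
    | cons q t =>
      rw [PySem.Chars.join_cons_cons]
      simp only [List.flatten_cons] at ih ⊢
      rw [ih]; simp

-- A's fold, pushed to character lists
theorem pv_foldA (l : List Int) (a : String) :
    (l.foldl
      (fun out i =>
        if PySem.Int.mod i 12 = 1 ∨ PySem.Int.mod i 12 = 3 ∨ PySem.Int.mod i 12 = 6 ∨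
           PySem.Int.mod i 12 = 8 ∨ PySem.Int.mod i 12 = 10 then
          out ++ "\u00a70\u258F"
        else
          out ++ "\u00a7f\u258F") a).toList =
    a.toList ++ ((l.map
      (fun i =>
        if PySem.Int.mod i 12 = 1 ∨ PySem.Int.mod i 12 = 3 ∨ PySem.Int.mod i 12 = 6 ∨
           PySem.Int.mod i 12 = 8 ∨ PySem.Int.mod i 12 = 10 then
          ("\u00a70\u258F" : String)
        else
          ("\u00a7f\u258F" : String))).map String.toList).flatten := by
  induction l generalizing a with
  | nil => simp
  | cons x t ih =>
    simp only [List.foldl_cons, List.map_cons, List.flatten_cons]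
    rw [ih]
    split_ifs with h <;> simp [String.toList_append]

-- the keystring of index i is pvBlock[i % 12]
theorem pv_key_eq (i : Int) :
    (if PySem.Int.mod i 12 = 1 ∨ PySem.Int.mod i 12 = 3 ∨ PySem.Int.mod i 12 = 6 ∨
        PySem.Int.mod i 12 = 8 ∨ PySem.Int.mod i 12 = 10 then
       ("\u00a70\u258F" : String)
     else
       ("\u00a7f\u258F" : String)) = pvBlock.getD (PySem.Int.mod i 12).toNat "" := by
  have h0 : (0:Int) ≤ PySem.Int.mod i 12 := PySem.Int.mod_nonneg i (by omega)
  have h1 : PySem.Int.mod i 12 < 12 := PySem.Int.mod_lt i (by omega)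
  obtain ⟨m, hm, h0', h1'⟩ :
      ∃ m : Int, PySem.Int.mod i 12 = m ∧ 0 ≤ m ∧ m < 12 := ⟨_, rfl, h0, h1⟩
  rw [hm]
  interval_cases m <;> decide

-- element of a tiled list
theorem pv_flatten_replicate_getElem {α : Type} (l : List α) (hl : 0 < l.length) (c j : Nat)
    (hj : j < ((List.replicate c l).flatten).length) :
    ((List.replicate c l).flatten)[j] = l[j % l.length]'(Nat.mod_lt _ hl) := by
  induction c generalizing j with
  | zero => simp at hj
  | succ c ih =>
    have hcons : (List.replicate (c+1) l).flatten = l ++ (List.replicate c l).flatten := by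
      rw [List.replicate_succ, List.flatten_cons]
    rw [List.getElem_of_eq hcons]
    rw [hcons] at hj
    rcases Nat.lt_or_ge j l.length with h | h
    · rw [List.getElem_append_left h]
      congr 1
      exact (Nat.mod_eq_of_lt h).symm
    · have hj' : j - l.length < ((List.replicate c l).flatten).length := by
        simp only [List.length_append, List.length_flatten, List.map_replicate,
          List.sum_replicate, smul_eq_mul] at hj ⊢
        omega
      rw [List.getElem_append_right h, ih (j - l.length) hj']
      congr 1
      exact (Nat.mod_eq_sub_mod h).symm

-- ===== VERDICT (by name: the statement is the Claim_ definition above) =====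
theorem drawKeyboard_spec : Claim_equal_drawKeyboard := by
  intro e s _
  unfold Spec_drawKeyboard
  by_cases hne : e - s ≤ 0
  · simp only [drawKeyboard_alt, hne, if_true]
    unfold drawKeyboard
    rw [PySem.List.pyRange_one_eq_nil (by omega)]
    rfl
  · simp only [drawKeyboard_alt, hne, if_false]
    unfold drawKeyboard
    apply String.toList_inj.mp
    rw [pv_foldA, PySem.Str.toList_join]
    have hsep : ("" : String).toList = ([] : List Char) := rfl
    rw [hsep, pv_join_nil_eq_flatten]
    rw [List.nil_append]
    -- it suffices that the two lists of key-strings agree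
    have hr0 : (0:Int) ≤ PySem.Int.mod s 12 := PySem.Int.mod_nonneg s (by omega)
    have hr1 : PySem.Int.mod s 12 < 12 := PySem.Int.mod_lt s (by omega)
    have hrotlen :
        (PySem.List.slice pvBlock (some (PySem.Int.mod s 12)) none ++
         PySem.List.slice pvBlock none (some (PySem.Int.mod s 12))).length = 12 := by
      rw [PySem.List.slice_from _ hr0, PySem.List.slice_to _ hr0]
      simp only [List.length_append, List.length_drop, List.length_take]
      have h12 : pvBlock.length = 12 := by decide
      rw [h12]
      omega
    have hdiv := PySem.Int.floordiv_mul_add_mod (e - s) 12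
    have hm0 : (0:Int) ≤ PySem.Int.mod (e - s) 12 := PySem.Int.mod_nonneg _ (by omega)
    have hm1 : PySem.Int.mod (e - s) 12 < 12 := PySem.Int.mod_lt _ (by omega)
    have hq0 : (0:Int) ≤ PySem.Int.floordiv (e - s) 12 := by nlinarith
    suffices hXY :
        (PySem.List.pyRange s e 1).map
          (fun i =>
            if PySem.Int.mod i 12 = 1 ∨ PySem.Int.mod i 12 = 3 ∨ PySem.Int.mod i 12 = 6 ∨
               PySem.Int.mod i 12 = 8 ∨ PySem.Int.mod i 12 = 10 then
              ("\u00a70\u258F" : String)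
            else
              ("\u00a7f\u258F" : String)) =
        PySem.List.slice
          (PySem.List.pyRepeat
            (PySem.List.slice pvBlock (some (PySem.Int.mod s 12)) none ++
             PySem.List.slice pvBlock none (some (PySem.Int.mod s 12)))
            (PySem.Int.floordiv (e - s) 12 + 1))
          none (some (e - s)) by
      rw [hXY]
    apply List.ext_getElem
    · -- lengths agree
      rw [PySem.List.slice_to _ (by omega)]
      simp only [List.length_take, List.length_map, PySem.List.length_pyRange_one,
        PySem.List.pyRepeat, List.length_flatten, List.map_replicate, List.sum_replicate,
        hrotlen, smul_eq_mul]
      omega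
    · intro j hj hj'
      simp only [List.length_map, PySem.List.length_pyRange_one] at hj
      rw [List.getElem_map, PySem.List.getElem_pyRange_one, pv_key_eq]
      rw [List.getElem_of_eq (PySem.List.slice_to _ (by omega : (0:Int) ≤ e - s)),
        List.getElem_take]
      rw [List.getElem_of_eq
        (show PySem.List.pyRepeat
            (PySem.List.slice pvBlock (some (PySem.Int.mod s 12)) none ++
             PySem.List.slice pvBlock none (some (PySem.Int.mod s 12)))
            (PySem.Int.floordiv (e - s) 12 + 1) =
          (List.replicate (PySem.Int.floordiv (e - s) 12 + 1).toNat
            (PySem.List.slice pvBlock (some (PySem.Int.mod s 12)) none ++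
             PySem.List.slice pvBlock none (some (PySem.Int.mod s 12)))).flatten from rfl)]
      have hrotpos :
          0 < (PySem.List.slice pvBlock (some (PySem.Int.mod s 12)) none ++
               PySem.List.slice pvBlock none (some (PySem.Int.mod s 12))).length := by
        rw [hrotlen]; omega
      have hjlt : j < ((List.replicate (PySem.Int.floordiv (e - s) 12 + 1).toNat
          (PySem.List.slice pvBlock (some (PySem.Int.mod s 12)) none ++
           PySem.List.slice pvBlock none (some (PySem.Int.mod s 12)))).flatten).length := by
        simp only [List.length_flatten, List.map_replicate, List.sum_replicate, hrotlen,
          smul_eq_mul]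
        omega
      rw [pv_flatten_replicate_getElem _ hrotpos _ _ hjlt]
      simp only [hrotlen]
      -- now: pvBlock.getD ((s + j) % 12) "" = rot[j % 12]
      set r : Nat := (PySem.Int.mod s 12).toNat with hrdef
      have hrlt : r < 12 := by omega
      have hgoalidx : (PySem.Int.mod (s + (j:Int)) 12).toNat = (r + j) % 12 := by
        have e1 : PySem.Int.mod (s + (j:Int)) 12 = (s + (j:Int)) % 12 :=
          PySem.Int.mod_eq_emod_of_pos (by omega)
        have e2 : PySem.Int.mod s 12 = s % 12 := PySem.Int.mod_eq_emod_of_pos (by omega)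
        rw [e1, hrdef, e2]
        omega
      rw [hgoalidx]
      have hrotget : ∀ (t : Nat) (ht : t < 12),
          (PySem.List.slice pvBlock (some (PySem.Int.mod s 12)) none ++
           PySem.List.slice pvBlock none (some (PySem.Int.mod s 12)))[t]'(by
             rw [hrotlen]; exact ht)
          = pvBlock.getD ((r + t) % 12) "" := by
        intro t ht
        have h12 : pvBlock.length = 12 := by decide
        rcases Nat.lt_or_ge t (12 - r) with hcase | hcase
        · rw [List.getElem_append_left (by
            rw [PySem.List.slice_from pvBlock hr0]
            simp only [List.length_drop, h12]
            omega)]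
          simp only [PySem.List.slice_from pvBlock hr0, List.getElem_drop]
          rw [List.getD_eq_getElem _ _ (by rw [h12]; omega)]
          congr 1
          omega
        · rw [List.getElem_append_right (by
            rw [PySem.List.slice_from pvBlock hr0]
            simp only [List.length_drop, h12]
            omega)]
          simp only [PySem.List.slice_from pvBlock hr0, PySem.List.slice_to pvBlock hr0,
            List.getElem_take, List.length_drop, h12]
          rw [List.getD_eq_getElem _ _ (by rw [h12]; omega)]
          congr 1
          omega
      have hjm : j % 12 < 12 := Nat.mod_lt _ (by omega)
      have hidx : (r + j) % 12 = (r + j % 12) % 12 := by omega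
      rw [hidx]
      exact (hrotget (j % 12) hjm).symm
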